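-- pv_equiv track=rewrite | github.com/katrinasm/old-corpse-rpg | comp/xcomp.py | make_runs
-- ===== SOURCE A (Python) =====
-- def make_runs(xs, max_len=256):
--     i = 0
--     runs = []
--     while i < len(xs):
--         n = count_sames(xs[i:])
--         while n > max_len:
--             runs.append((max_len, xs[i]))
--             n -= max_len
--         if n != 0:
--             runs.append((n, xs[i]))
--         i += n
--     return runs
--
-- def count_sames(xs):
--     if len(xs) <= 1:
--         return len(xs)
--     else:
--         i = 1
--         x = xs[0]
--         while i < len(xs) and xs[i] == x:
--             i += 1
--         return i
-- ===== SOURCE B (Python) =====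
-- def make_runs(xs, max_len=256):
--     # Single pass: scan each run once, advance past the whole run, and split
--     # long runs arithmetically with divmod instead of repeated subtraction.
--     # Intended fix: A advances i by only the remainder of a long run, so it
--     # re-encodes part of the run again; B advances by the full run.
--     runs = []
--     count = 0
--     prev = None
--     for x in xs:
--         if count and x == prev:
--             count += 1
--         else:
--             if count:
--                 _emit(runs, count, prev, max_len)
--             prev, count = x, 1
--     if count:
--         _emit(runs, count, prev, max_len)
--     return runs
--
-- def _emit(runs, count, val, max_len):
--     q, r = divmod(count, max_len)
--     runs += [(max_len, val)] * q
--     if r: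
--         runs.append((r, val))
-- ===== Notes on version B (the rewrite author's own statement) =====
-- stated objective: faster
-- what changed: One left-to-right pass with a (value,count) accumulator and divmod-based splitting replaces A's index loop that re-slices the list and re-scans long runs, advancing past each run exactly once.
-- intended difference: On inputs containing a run longer than max_len, A advances i by only the remainder of the run and so encodes parts of the run again (its chunk counts sum to more than len(xs)); B emits len//max_len full chunks plus the remainder, the intended run-length encoding. — e.g. on make_runs([1, 1], 1): A returns [(1, 1), (1, 1), (1, 1)], B returns [(1, 1), (1, 1)]
import Mathlib
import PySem

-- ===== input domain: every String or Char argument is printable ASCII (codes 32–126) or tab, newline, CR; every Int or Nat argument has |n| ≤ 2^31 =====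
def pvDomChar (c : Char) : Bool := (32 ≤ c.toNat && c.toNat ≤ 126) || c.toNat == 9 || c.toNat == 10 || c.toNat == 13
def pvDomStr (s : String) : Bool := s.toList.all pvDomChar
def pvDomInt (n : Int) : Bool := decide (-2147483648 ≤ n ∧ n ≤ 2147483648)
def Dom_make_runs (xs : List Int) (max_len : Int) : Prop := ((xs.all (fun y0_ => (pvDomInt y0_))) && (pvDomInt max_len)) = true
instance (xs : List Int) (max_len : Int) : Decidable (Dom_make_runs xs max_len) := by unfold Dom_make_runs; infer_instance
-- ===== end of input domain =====

-- B replaces A's re-slicing, run-re-scanning index loop by a single accumulator pass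
-- (asymptotically faster), and fixes A's advance-by-remainder slip on runs longer than max_len (see D_).

-- ===== PORT A =====

-- inner `while i < len(xs) and xs[i] == x: i += 1` of count_sames
-- (fuel = xs.length always suffices: i only moves forward; xs.getD i 0 is xs[i], in range here)
def csLoop (xs : List Int) (x : Int) : Nat → Nat → Nat
  | i, 0 => i
  | i, fuel + 1 =>
    if i < xs.length then
      (if xs.getD i 0 = x then csLoop xs x (i + 1) fuel else i)
    else i

def count_sames (xs : List Int) : Int :=
  if xs.length ≤ 1 then (xs.length : Int)
  else
    match xs with
    | [] => 0            -- unreachable: length ≥ 2 here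
    | x :: _ => (csLoop xs x 1 xs.length : Int)

-- inner `while n > max_len: runs.append((max_len, xs[i])); n -= max_len`
-- (fuel guard for totality only: with 1 ≤ max_len the fuel n.toNat + 1 is never exhausted;
--  with max_len ≤ 0 Python diverges, outside Pre_)
def innerA (m x : Int) : Int → List (Int × Int) → Nat → Int × List (Int × Int)
  | n, runs, 0 => (n, runs)
  | n, runs, fuel + 1 =>
    if m < n then innerA m x (n - m) (runs ++ [(m, x)]) fuel else (n, runs)

-- outer `while i < len(xs)` loop (fuel = xs.length + 1: i advances by ≥ 1 each pass)
def outerA (xs : List Int) (m : Int) : Int → List (Int × Int) → Nat → List (Int × Int)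
  | _, runs, 0 => runs
  | i, runs, fuel + 1 =>
    if i < (xs.length : Int) then
      let n := count_sames (PySem.List.slice xs (some i) none)
      let x := PySem.List.pyGetD xs i 0      -- xs[i]; i is in range whenever Python reaches it
      let p := innerA m x n runs (n.toNat + 1)
      let runs' := if p.1 ≠ 0 then p.2 ++ [(p.1, x)] else p.2
      outerA xs m (i + p.1) runs' fuel
    else runs

def make_runs (xs : List Int) (max_len : Int) : List (Int × Int) :=
  outerA xs max_len 0 [] (xs.length + 1)

-- ===== PORT B =====

-- _emit: q, r = divmod(count, max_len); runs += [(max_len, val)] * q; if r: runs.append((r, val))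
-- (divmod? is none only for max_len = 0, where Python raises ZeroDivisionError — outside Pre_)
def emitB (runs : List (Int × Int)) (count v m : Int) : List (Int × Int) :=
  match PySem.Int.divmod? count m with
  | none => runs
  | some (q, r) => (runs ++ List.replicate q.toNat (m, v)) ++ (if r ≠ 0 then [(r, v)] else [])

def stepB (m : Int) (st : List (Int × Int) × Int × Int) (x : Int) : List (Int × Int) × Int × Int :=
  if st.2.2 ≠ 0 ∧ x = st.2.1 then (st.1, st.2.1, st.2.2 + 1)
  else ((if st.2.2 ≠ 0 then emitB st.1 st.2.2 st.2.1 m else st.1), x, 1)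

def make_runs_alt (xs : List Int) (max_len : Int) : List (Int × Int) :=
  let s := xs.foldl (stepB max_len) ([], 0, 0)
  if s.2.2 ≠ 0 then emitB s.1 s.2.2 s.2.1 max_len else s.1

-- ===== PRECONDITION & SPEC =====

-- Pre_ excludes only divergence: with a nonempty xs and max_len ≤ 0 A's inner while never terminates.
def Pre_make_runs (xs : List Int) (max_len : Int) : Prop := xs = [] ∨ 1 ≤ max_len
instance (xs : List Int) (max_len : Int) : Decidable (Pre_make_runs xs max_len) := by
  unfold Pre_make_runs; infer_instance

def pvWitness_make_runs : List Int × Int := ([1, 2, 2], 3)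

-- On inputs with a run longer than max_len, A advances i by only the remainder of the run and
-- re-encodes part of it (chunk counts sum to more than len(xs)); B emits len//max_len full chunks
-- plus the remainder, the intended run-length encoding.
def D_make_runs (xs : List Int) (max_len : Int) : Prop :=
  ∃ i ∈ List.range xs.length,
    i + max_len.toNat < xs.length ∧
      ∀ j ∈ List.range (max_len.toNat + 1), xs.getD (i + j) 0 = xs.getD i 0
instance (xs : List Int) (max_len : Int) : Decidable (D_make_runs xs max_len) := by
  unfold D_make_runs; infer_instance

def Spec_make_runs (xs : List Int) (max_len : Int) (out : List (Int × Int)) : Prop :=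
  ¬ D_make_runs xs max_len → out = make_runs_alt xs max_len
instance (xs : List Int) (max_len : Int) (out : List (Int × Int)) : Decidable (Spec_make_runs xs max_len out) := by
  unfold Spec_make_runs; infer_instance

def pvDiffWitness_make_runs : List Int × Int := ([1, 1], 1)
def pvDiffWitnessOut_make_runs : (List (Int × Int)) × (List (Int × Int)) :=
  ([(1, 1), (1, 1), (1, 1)], [(1, 1), (1, 1)])

-- ===== CLAIM (what is proved, stated in full; the proofs are below) =====
def Claim_unchanged_make_runs : Prop := ∀ (xs : List Int) (max_len : Int), Dom_make_runs xs max_len → Pre_make_runs xs max_len → Spec_make_runs xs max_len (make_runs xs max_len)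
def Claim_exact_make_runs : Prop := ∀ (xs : List Int) (max_len : Int), Dom_make_runs xs max_len → Pre_make_runs xs max_len → D_make_runs xs max_len → make_runs xs max_len ≠ make_runs_alt xs max_len
def Claim_changed_make_runs : Prop := Dom_make_runs (pvDiffWitness_make_runs.1) (pvDiffWitness_make_runs.2) ∧ Pre_make_runs (pvDiffWitness_make_runs.1) (pvDiffWitness_make_runs.2) ∧ D_make_runs (pvDiffWitness_make_runs.1) (pvDiffWitness_make_runs.2) ∧ make_runs (pvDiffWitness_make_runs.1) (pvDiffWitness_make_runs.2) = pvDiffWitnessOut_make_runs.1 ∧ make_runs_alt (pvDiffWitness_make_runs.1) (pvDiffWitness_make_runs.2) = pvDiffWitnessOut_make_runs.2 ∧ pvDiffWitnessOut_make_runs.1 ≠ pvDiffWitnessOut_make_runs.2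

-- ===== LEMMAS AND PROOFS =====

-- length of the leading run of equal elements
def leadN (x : Int) : List Int → Nat
  | [] => 0
  | y :: t => if y = x then leadN x t + 1 else 0

def leadRunN : List Int → Nat
  | [] => 0
  | x :: t => leadN x t + 1

-- canonical run-length encoding (no run exceeds max_len, so no splitting is needed)
def rle : List Int → List (Int × Int)
  | [] => []
  | x :: t => (((leadN x t + 1 : Nat) : Int), x) :: rle (t.drop (leadN x t))
termination_by xs => xs.length
decreasing_by
  simp [List.length_drop]

theorem rle_nil : rle [] = [] := by
  rw [rle.eq_def]

theorem rle_cons (x : Int) (t : List Int) :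
    rle (x :: t) = (((leadN x t + 1 : Nat) : Int), x) :: rle (t.drop (leadN x t)) := by
  rw [rle.eq_def]

theorem leadN_le (x : Int) (t : List Int) : leadN x t ≤ t.length := by
  induction t with
  | nil => simp [leadN]
  | cons y t ih =>
    by_cases h : y = x
    · simp [leadN, h]; omega
    · simp [leadN, h]

theorem csLoop_eq (xs : List Int) (x : Int) :
    ∀ (fuel i : Nat), xs.length ≤ i + fuel →
      csLoop xs x i fuel = i + leadN x (xs.drop i) := by
  intro fuel
  induction fuel with
  | zero =>
    intro i h
    have hnil : xs.drop i = [] := List.drop_eq_nil_of_le (by omega)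
    rw [show csLoop xs x i 0 = i from rfl, hnil]
    simp [leadN]
  | succ fuel ih =>
    intro i h
    rw [show csLoop xs x i (fuel + 1)
          = if i < xs.length then
              (if xs.getD i 0 = x then csLoop xs x (i + 1) fuel else i) else i from rfl]
    by_cases hi : i < xs.length
    · have hd : xs.drop i = xs[i] :: xs.drop (i + 1) := List.drop_eq_getElem_cons hi
      have hg : xs.getD i 0 = xs[i] := List.getD_eq_getElem xs 0 hi
      rw [if_pos hi, hg]
      by_cases he : xs[i] = x
      · rw [if_pos he, ih (i + 1) (by omega), hd]
        simp [leadN, he]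
        omega
      · rw [if_neg he, hd]
        simp [leadN, he]
    · have hnil : xs.drop i = [] := List.drop_eq_nil_of_le (by omega)
      rw [if_neg hi, hnil]
      simp [leadN]

theorem count_sames_eq (ys : List Int) : count_sames ys = (leadRunN ys : Int) := by
  cases ys with
  | nil => simp [count_sames, leadRunN]
  | cons x t =>
    cases t with
    | nil => simp [count_sames, leadRunN, leadN]
    | cons y t' =>
      have hlen : ¬ ((x :: y :: t').length ≤ 1) := by simp
      simp only [count_sames, hlen, if_false]
      rw [csLoop_eq _ _ _ 1 (by omega)]
      simp [leadRunN]
      omega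

-- with a run of length n, 1 ≤ n ≤ m, the inner while body never runs
theorem innerA_small (m x n : Int) (runs : List (Int × Int)) (fuel : Nat)
    (h : n ≤ m) : innerA m x n runs (fuel + 1) = (n, runs) := by
  simp [innerA, not_lt.mpr h]

-- no suffix of xs starts with a run longer than m
def NoLong (xs : List Int) (m : Int) : Prop := ∀ i : Nat, (leadRunN (xs.drop i) : Int) ≤ m

theorem leadN_getD (x : Int) (t : List Int) :
    ∀ j, j < leadN x t → t.getD j 0 = x ∧ j < t.length := by
  induction t with
  | nil => simp [leadN]
  | cons z t' ih =>
    intro j hj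
    by_cases hz : z = x
    · simp only [leadN, hz, if_pos] at hj
      cases j with
      | zero => simp [hz]
      | succ j =>
        have h' := ih j (by omega)
        refine ⟨by simpa using h'.1, by simp; omega⟩
    · simp [leadN, hz] at hj

theorem leadRunN_getD (ys : List Int) :
    ∀ j, j < leadRunN ys → ys.getD j 0 = ys.getD 0 0 ∧ j < ys.length := by
  cases ys with
  | nil => simp [leadRunN]
  | cons x t =>
    intro j hj
    simp only [leadRunN] at hj
    cases j with
    | zero => simp
    | succ j =>
      have h' := leadN_getD x t j (by omega)
      refine ⟨by simpa using h'.1, by simp; omega⟩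

theorem leadN_max (x : Int) (t : List Int) (h : leadN x t < t.length) :
    t.getD (leadN x t) 0 ≠ x := by
  induction t with
  | nil => simp [leadN] at h
  | cons z t' ih =>
    by_cases hz : z = x
    · simp only [leadN, hz, if_pos, List.getD_cons_succ]
      exact ih (by simpa [leadN, hz] using h)
    · simp [leadN, hz]

theorem leadRunN_max (ys : List Int) (h : leadRunN ys < ys.length) :
    ys.getD (leadRunN ys) 0 ≠ ys.getD 0 0 := by
  cases ys with
  | nil => simp [leadRunN] at h
  | cons x t =>
    simp only [leadRunN] at h ⊢
    have h' := leadN_max x t (by simp at h; omega)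
    simpa [List.getD_cons_succ] using h'

theorem getD_drop_add (xs : List Int) (i k : Nat) :
    (xs.drop i).getD k 0 = xs.getD (i + k) 0 := by
  simp [List.getD_eq_getElem?_getD, List.getElem?_drop]

theorem noLong_of_notD (xs : List Int) (m : Int) (hm : 1 ≤ m) (hD : ¬ D_make_runs xs m) :
    NoLong xs m := by
  intro i
  by_contra h
  push Not at h
  have hlen : xs.drop i ≠ [] := by
    intro hnil
    rw [hnil] at h
    simp [leadRunN] at h
    omega
  have hi : i < xs.length := by
    by_contra hh
    exact hlen (List.drop_eq_nil_of_le (by omega))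
  have hrun : m.toNat + 1 ≤ leadRunN (xs.drop i) := by omega
  apply hD
  refine ⟨i, by simpa using hi, ?_, ?_⟩
  · have h2 := (leadRunN_getD (xs.drop i) m.toNat (by omega)).2
    simp [List.length_drop] at h2
    omega
  · intro j hj
    simp only [List.mem_range] at hj
    have h1 := (leadRunN_getD (xs.drop i) j (by omega)).1
    have e0 : (xs.drop i).getD 0 0 = xs.getD i 0 := by
      simp [List.getD_eq_getElem?_getD, List.getElem?_drop]
    rw [← getD_drop_add, ← e0, h1]

-- A's outer loop computes the canonical encoding
theorem outerA_eq (xs : List Int) (m : Int) (hL : NoLong xs m) :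
    ∀ (fuel k : Nat) (runs : List (Int × Int)), k ≤ xs.length → xs.length - k < fuel →
      outerA xs m (k : Int) runs fuel = runs ++ rle (xs.drop k) := by
  intro fuel
  induction fuel with
  | zero => omega
  | succ fuel ih =>
    intro k runs hk hfuel
    by_cases h : k < xs.length
    · have hd : xs.drop k = xs[k] :: xs.drop (k + 1) := List.drop_eq_getElem_cons h
      set x := xs[k] with hx
      set r : Nat := leadN x (xs.drop (k + 1)) + 1 with hr
      have hcs : count_sames (PySem.List.slice xs (some (k : Int)) none) = (r : Int) := by
        rw [PySem.List.slice_from_natCast, count_sames_eq, hd]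
        simp [leadRunN, hr]
      have hrm : (r : Int) ≤ m := by
        have := hL k
        rw [hd] at this
        simpa [leadRunN, hr] using this
      have hget : PySem.List.pyGetD xs (k : Int) 0 = x := by
        simp [PySem.List.pyGetD_natCast, List.getD_eq_getElem?_getD, h, hx]
      have hrlen : r ≤ xs.length - k := by
        have := leadN_le x (xs.drop (k + 1))
        simp [List.length_drop] at this
        omega
      rw [show (k : Int) = ((k : Nat) : Int) from rfl]
      simp only [outerA, show ((k : Nat) : Int) < (xs.length : Int) from by exact_mod_cast h, if_pos]
      rw [hcs, hget, innerA_small m x (r : Int) runs ((r : Int).toNat) hrm]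
      have hrne : ((r : Int) ≠ 0) := by positivity
      simp only [hrne, if_pos, ne_eq, not_false_eq_true]
      have hstep : ((k : Int) + (r : Int)) = (((k + r : Nat)) : Int) := by push_cast; ring
      rw [hstep, ih (k + r) (runs ++ [((r : Int), x)]) (by omega) (by omega)]
      have hdrop : xs.drop (k + r) = (xs.drop (k + 1)).drop (leadN x (xs.drop (k + 1))) := by
        rw [List.drop_drop]
        congr 1
        omega
      rw [hdrop]
      conv_rhs => rw [hd, rle_cons]
      simp [hr]
    · have hk' : k = xs.length := by omega
      have : ¬ ((k : Int) < (xs.length : Int)) := by exact_mod_cast by omega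
      simp [outerA, hk']
      exact rle_nil

-- with 1 ≤ count ≤ m, _emit appends exactly one pair
theorem emitB_small (runs : List (Int × Int)) (c v m : Int) (h1 : 1 ≤ c) (h2 : c ≤ m) :
    emitB runs c v m = runs ++ [(c, v)] := by
  have hm : (0 : Int) < m := by omega
  have hm' : m ≠ 0 := by omega
  by_cases hc : c = m
  · subst hc
    have hdm : PySem.Int.divmod? c c
        = some (PySem.Int.floordiv c c, PySem.Int.mod c c) := by
      simp [PySem.Int.divmod?, hm', PySem.Int.floordiv, PySem.Int.mod]
    have hq : PySem.Int.floordiv c c = 1 := by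
      rw [PySem.Int.floordiv_eq_iff_of_pos hm]; omega
    have hr : PySem.Int.mod c c = 0 := by
      have := PySem.Int.floordiv_mul_add_mod c c
      rw [hq] at this; omega
    simp [emitB, hdm, hq, hr]
  · have hdm : PySem.Int.divmod? c m
        = some (PySem.Int.floordiv c m, PySem.Int.mod c m) := by
      simp [PySem.Int.divmod?, hm', PySem.Int.floordiv, PySem.Int.mod]
    have hq : PySem.Int.floordiv c m = 0 := by
      rw [PySem.Int.floordiv_eq_iff_of_pos hm]; omega
    have hr : PySem.Int.mod c m = c := by
      have := PySem.Int.floordiv_mul_add_mod c m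
      rw [hq] at this; omega
    have hc0 : c ≠ 0 := by omega
    simp [emitB, hdm, hq, hr, hc0]

-- B's fold, carrying a pending run (v, c), computes the canonical encoding
theorem foldB_eq (m : Int) (xs : List Int) :
    ∀ (runs : List (Int × Int)) (v c : Int), 1 ≤ c →
      c + (leadN v xs : Int) ≤ m → NoLong xs m →
      (let s := xs.foldl (stepB m) (runs, v, c)
       if s.2.2 ≠ 0 then emitB s.1 s.2.2 s.2.1 m else s.1)
        = runs ++ ((c + (leadN v xs : Nat), v) :: rle (xs.drop (leadN v xs))) := by
  induction xs with
  | nil =>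
    intro runs v c h1 h2 _
    simp only [List.foldl_nil, leadN]
    have : c ≠ 0 := by omega
    simp only [this, ne_eq, not_false_eq_true, if_pos]
    rw [emitB_small runs c v m h1 (by simpa [leadN] using h2)]
    simp [rle_nil]
  | cons y t ih =>
    intro runs v c h1 h2 hL
    have hLt : NoLong t m := fun i => by simpa using hL (i + 1)
    by_cases hy : y = v
    · have hlead : leadN v (y :: t) = leadN v t + 1 := by simp [leadN, hy]
      rw [hlead] at h2
      have hstep : stepB m (runs, v, c) y = (runs, v, c + 1) := by
        simp [stepB, hy]; omega
      simp only [List.foldl_cons, hstep]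
      rw [ih runs v (c + 1) (by omega) (by push_cast at h2 ⊢; omega) hLt]
      have hdrop : (y :: t).drop (leadN v (y :: t)) = t.drop (leadN v t) := by
        simp [hlead]
      rw [hdrop, hlead]
      congr 3
      push_cast; ring
    · have hlead : leadN v (y :: t) = 0 := by simp [leadN, hy]
      have hcm : c ≤ m := by rw [hlead] at h2; simpa using h2
      have hstep : stepB m (runs, v, c) y = (runs ++ [(c, v)], y, 1) := by
        have hc : c ≠ 0 := by omega
        simp [stepB, hy, hc, emitB_small runs c v m h1 hcm]
      simp only [List.foldl_cons, hstep]
      have h0 := hL 0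
      simp only [List.drop_zero, leadRunN] at h0
      rw [ih (runs ++ [(c, v)]) y 1 (by omega) (by push_cast at h0 ⊢; omega) hLt]
      rw [hlead]
      simp only [List.drop_zero]
      conv_rhs => rw [rle_cons]
      simp
      omega

theorem altB_eq (xs : List Int) (m : Int) (hL : NoLong xs m) :
    make_runs_alt xs m = rle xs := by
  cases xs with
  | nil => simp [make_runs_alt, rle]
  | cons x t =>
    have hstep : stepB m ([], 0, 0) x = ([], x, 1) := by simp [stepB]
    have h0 := hL 0
    simp only [List.drop_zero, leadRunN] at h0
    have hLt : NoLong t m := fun i => by simpa using hL (i + 1)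
    simp only [make_runs_alt, List.foldl_cons, hstep]
    rw [foldB_eq m t [] x 1 (by omega) (by push_cast at h0 ⊢; omega) hLt]
    conv_rhs => rw [rle_cons]
    simp
    omega

-- total of the chunk counts of an encoding
def sumCounts (l : List (Int × Int)) : Int := (l.map Prod.fst).sum

theorem emitB_sum (runs : List (Int × Int)) (c v m : Int) (hm : 1 ≤ m) (hc : 1 ≤ c) :
    sumCounts (emitB runs c v m) = sumCounts runs + c := by
  have hm0 : m ≠ 0 := by omega
  have hmpos : (0 : Int) < m := by omega
  have hdm : PySem.Int.divmod? c m
      = some (PySem.Int.floordiv c m, PySem.Int.mod c m) := by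
    simp [PySem.Int.divmod?, hm0, PySem.Int.floordiv, PySem.Int.mod]
  have hq0 : 0 ≤ PySem.Int.floordiv c m :=
    (PySem.Int.le_floordiv_iff_mul_le hmpos).mpr (by omega)
  have heq := PySem.Int.floordiv_mul_add_mod c m
  by_cases hr : PySem.Int.mod c m = 0
  · simp [emitB, hdm, hr, sumCounts, Int.toNat_of_nonneg hq0]
    rw [hr] at heq; omega
  · simp [emitB, hdm, hr, sumCounts, Int.toNat_of_nonneg hq0]
    omega

theorem foldB_sum (m : Int) (hm : 1 ≤ m) (xs : List Int) :
    ∀ (runs : List (Int × Int)) (v c : Int), 1 ≤ c →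
      sumCounts (let s := xs.foldl (stepB m) (runs, v, c);
        if s.2.2 ≠ 0 then emitB s.1 s.2.2 s.2.1 m else s.1)
        = sumCounts runs + c + xs.length := by
  induction xs with
  | nil =>
    intro runs v c h1
    have hc : c ≠ 0 := by omega
    simp only [List.foldl_nil, hc, ne_eq, not_false_eq_true, if_pos]
    rw [emitB_sum runs c v m hm h1]
    simp
  | cons y t ih =>
    intro runs v c h1
    by_cases hy : y = v
    · have hstep : stepB m (runs, v, c) y = (runs, v, c + 1) := by
        simp [stepB, hy]; omega
      simp only [List.foldl_cons, hstep]
      rw [ih runs v (c + 1) (by omega)]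
      simp only [List.length_cons]
      push_cast
      omega
    · have hc : c ≠ 0 := by omega
      have hstep : stepB m (runs, v, c) y = (emitB runs c v m, y, 1) := by
        simp [stepB, hy, hc]
      simp only [List.foldl_cons, hstep]
      rw [ih (emitB runs c v m) y 1 (by omega), emitB_sum runs c v m hm h1]
      simp only [List.length_cons]
      push_cast
      omega

theorem sumB (xs : List Int) (m : Int) (hm : 1 ≤ m) :
    sumCounts (make_runs_alt xs m) = xs.length := by
  cases xs with
  | nil => simp [make_runs_alt, sumCounts]
  | cons x t =>
    have hstep : stepB m ([], 0, 0) x = ([], x, 1) := by simp [stepB]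
    simp only [make_runs_alt, List.foldl_cons, hstep]
    rw [foldB_sum m hm t [] x 1 (by omega)]
    simp [sumCounts]
    omega

theorem innerA_spec (m x : Int) (hm : 1 ≤ m) :
    ∀ (fuel : Nat) (n : Int) (runs : List (Int × Int)), 1 ≤ n → n.toNat ≤ fuel →
      1 ≤ (innerA m x n runs fuel).1 ∧ (innerA m x n runs fuel).1 ≤ n ∧
      sumCounts (innerA m x n runs fuel).2 = sumCounts runs + (n - (innerA m x n runs fuel).1) ∧
      (m < n → (innerA m x n runs fuel).1 < n) := by
  intro fuel
  induction fuel with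
  | zero => intro n runs h1 h2; omega
  | succ fuel ih =>
    intro n runs h1 h2
    rw [show innerA m x n runs (fuel + 1)
          = if m < n then innerA m x (n - m) (runs ++ [(m, x)]) fuel else (n, runs) from rfl]
    by_cases h : m < n
    · rw [if_pos h]
      obtain ⟨a1, a2, a3, _⟩ := ih (n - m) (runs ++ [(m, x)]) (by omega) (by omega)
      refine ⟨a1, by omega, ?_, fun _ => by omega⟩
      rw [a3]
      simp [sumCounts]
      ring
    · rw [if_neg h]
      exact ⟨h1, le_refl n, by simp, fun hc => absurd hc h⟩

theorem outerA_ge (xs : List Int) (m : Int) (hm : 1 ≤ m) :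
    ∀ (fuel k : Nat) (runs : List (Int × Int)), k ≤ xs.length → xs.length - k < fuel →
      sumCounts runs + ((xs.length : Int) - k) ≤ sumCounts (outerA xs m (k : Int) runs fuel) := by
  intro fuel
  induction fuel with
  | zero => intro k runs hk hf; omega
  | succ fuel ih =>
    intro k runs hk hf
    by_cases h : k < xs.length
    · have hd : xs.drop k = xs[k] :: xs.drop (k + 1) := List.drop_eq_getElem_cons h
      set x := xs[k] with hx
      set r : Nat := leadN x (xs.drop (k + 1)) + 1 with hr
      have hcs : count_sames (PySem.List.slice xs (some (k : Int)) none) = (r : Int) := by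
        rw [PySem.List.slice_from_natCast, count_sames_eq, hd]
        simp [leadRunN, hr]
      have hget : PySem.List.pyGetD xs (k : Int) 0 = x := by
        simp [PySem.List.pyGetD_natCast, List.getD_eq_getElem?_getD, h, hx]
      have hrlen : r ≤ xs.length - k := by
        have := leadN_le x (xs.drop (k + 1))
        simp [List.length_drop] at this
        omega
      rw [show (k : Int) = ((k : Nat) : Int) from rfl]
      simp only [outerA, show ((k : Nat) : Int) < (xs.length : Int) from by exact_mod_cast h, if_pos]
      rw [hcs, hget]
      obtain ⟨hp1, hp2, hp3, _⟩ :=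
        innerA_spec m x hm ((r : Int).toNat + 1) (r : Int) runs (by omega) (by omega)
      set p := innerA m x (r : Int) runs ((r : Int).toNat + 1) with hpdef
      have hne : p.1 ≠ 0 := by omega
      rw [if_pos hne]
      rw [show (k : Int) + p.1 = ((k + p.1.toNat : Nat) : Int) from by omega]
      have htail := ih (k + p.1.toNat) (p.2 ++ [(p.1, x)]) (by omega) (by omega)
      have hsum : sumCounts (p.2 ++ [(p.1, x)]) = sumCounts runs + (r : Int) := by
        have he : sumCounts (p.2 ++ [(p.1, x)]) = sumCounts p.2 + p.1 := by simp [sumCounts]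
        omega
      omega
    · have hk' : k = xs.length := by omega
      have hnlt : ¬ ((k : Int) < (xs.length : Int)) := by exact_mod_cast by omega
      simp only [outerA, hnlt, if_false]
      omega

theorem outerA_gt (xs : List Int) (m : Int) (hm : 1 ≤ m) :
    ∀ (fuel k : Nat) (runs : List (Int × Int)) (i : Nat),
      k ≤ i → i + m.toNat < xs.length →
      (∀ j ∈ List.range (m.toNat + 1), xs.getD (i + j) 0 = xs.getD i 0) →
      xs.length - k < fuel →
      sumCounts runs + ((xs.length : Int) - k) < sumCounts (outerA xs m (k : Int) runs fuel) := by
  intro fuel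
  induction fuel with
  | zero => intro k runs i hki hilen hconst hf; omega
  | succ fuel ih =>
    intro k runs i hki hilen hconst hf
    have h : k < xs.length := by omega
    have hd : xs.drop k = xs[k] :: xs.drop (k + 1) := List.drop_eq_getElem_cons h
    set x := xs[k] with hx
    set r : Nat := leadN x (xs.drop (k + 1)) + 1 with hr
    have hlr : leadRunN (xs.drop k) = r := by
      rw [hd]; simp [leadRunN, hr]
    have hcs : count_sames (PySem.List.slice xs (some (k : Int)) none) = (r : Int) := by
      rw [PySem.List.slice_from_natCast, count_sames_eq, hlr]
    have hget : PySem.List.pyGetD xs (k : Int) 0 = x := by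
      simp [PySem.List.pyGetD_natCast, List.getD_eq_getElem?_getD, h, hx]
    have hrlen : r ≤ xs.length - k := by
      have := leadN_le x (xs.drop (k + 1))
      simp [List.length_drop] at this
      omega
    rw [show (k : Int) = ((k : Nat) : Int) from rfl]
    simp only [outerA, show ((k : Nat) : Int) < (xs.length : Int) from by exact_mod_cast h, if_pos]
    rw [hcs, hget]
    by_cases hbig : m < (r : Int)
    · obtain ⟨hp1, hp2, hp3, hp4⟩ :=
        innerA_spec m x hm ((r : Int).toNat + 1) (r : Int) runs (by omega) (by omega)
      set p := innerA m x (r : Int) runs ((r : Int).toNat + 1) with hpdef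
      have hstrict : p.1 < (r : Int) := hp4 hbig
      have hne : p.1 ≠ 0 := by omega
      rw [if_pos hne]
      rw [show (k : Int) + p.1 = ((k + p.1.toNat : Nat) : Int) from by omega]
      have htail := outerA_ge xs m hm fuel (k + p.1.toNat) (p.2 ++ [(p.1, x)]) (by omega) (by omega)
      have hsum : sumCounts (p.2 ++ [(p.1, x)]) = sumCounts runs + (r : Int) := by
        have he : sumCounts (p.2 ++ [(p.1, x)]) = sumCounts p.2 + p.1 := by simp [sumCounts]
        omega
      omega
    · have hrm : (r : Int) ≤ m := by omega
      rw [innerA_small m x (r : Int) runs ((r : Int).toNat) hrm]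
      simp only []
      have hrne : (r : Int) ≠ 0 := by omega
      rw [if_pos hrne]
      have hir : k + r ≤ i := by
        by_contra hlt
        push Not at hlt
        have e1 : xs.getD i 0 = xs.getD k 0 := by
          have h1 := (leadRunN_getD (xs.drop k) (i - k) (by rw [hlr]; omega)).1
          rw [getD_drop_add, getD_drop_add] at h1
          simpa [show k + (i - k) = i from by omega] using h1
        have hmax : xs.getD (k + r) 0 ≠ xs.getD k 0 := by
          have h2 := leadRunN_max (xs.drop k)
            (by rw [hlr]; simp [List.length_drop]; omega)
          rw [hlr, getD_drop_add, getD_drop_add] at h2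
          simpa using h2
        have e2 : xs.getD (k + r) 0 = xs.getD i 0 := by
          have h3 := hconst (k + r - i) (by simp [List.mem_range]; omega)
          simpa [show i + (k + r - i) = k + r from by omega] using h3
        exact hmax (by rw [e2, e1])
      rw [show (k : Int) + (r : Int) = ((k + r : Nat) : Int) from by omega]
      have htail := ih (k + r) (runs ++ [((r : Int), x)]) i hir hilen hconst (by omega)
      have hsum : sumCounts (runs ++ [((r : Int), x)]) = sumCounts runs + (r : Int) := by
        simp [sumCounts]
      omega

-- ===== VERDICT (by name: the statement is the Claim_ definition above) =====
theorem make_runs_spec : Claim_unchanged_make_runs := by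
  intro xs m _ hpre hD
  rcases hpre with h | hm
  · subst h
    simp [make_runs, make_runs_alt, outerA]
  · have hL := noLong_of_notD xs m hm hD
    have hA : make_runs xs m = rle xs := by
      unfold make_runs
      rw [show (0 : Int) = ((0 : Nat) : Int) from rfl,
          outerA_eq xs m hL (xs.length + 1) 0 [] (by omega) (by omega)]
      simp
    rw [hA, altB_eq xs m hL]

theorem make_runs_changed : Claim_changed_make_runs := by
  unfold Claim_changed_make_runs; decide

theorem make_runs_tight : Claim_exact_make_runs := by
  intro xs m _ hpre hD
  obtain ⟨i, hi, hilen, hconst⟩ := hD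
  have hm : 1 ≤ m := by
    rcases hpre with h | h
    · subst h; simp at hilen
    · exact h
  intro heq
  have hA := outerA_gt xs m hm (xs.length + 1) 0 [] i (by omega) hilen hconst (by omega)
  have hB := sumB xs m hm
  have hMA : make_runs xs m = outerA xs m ((0 : Nat) : Int) [] (xs.length + 1) := rfl
  rw [← hMA, heq, hB] at hA
  simp [sumCounts] at hA
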